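-- pv_equiv track=rewrite | github.com/naniwazu/Python-cp-library | floor_sum.py | floor_sum
-- ===== SOURCE A (Python) =====
-- def floor_sum(n, m, a, b):
--     res = 0
--     while True:
--         if a >= m:
--             res += (a//m) * n * (n-1) // 2
--             a %= m
--         if b >= m:
--             res += n * (b//m)
--             b %= m
--         if a*n + b < m:
--             break
--         u = (a*n + b)//m
--         v = u*m - b
--         res += (n - (v+a-1)//a) * u
--         n, m, a, b = u, a, m, (a-v) % a
--     return res
-- ===== SOURCE B (Python) =====
-- def _red(x, m):
--     # (residue, quotient) of x by m -- applied only once x has reached m,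
--     # exactly like the in-place reductions of the loop version
--     return (x % m, x // m) if x >= m else (x, 0)
--
--
-- def floor_sum(n, m, a, b):
--     a, qa = _red(a, m)
--     b, qb = _red(b, m)
--     part = qa * ((n - 1) * n // 2) + qb * n
--     u = (a * n + b) // m
--     if u <= 0:
--         return part
--     c = b - u * m
--     return part + u * (n + c // a) + floor_sum(u, a, m, c % a)
-- ===== Notes on version B (the rewrite author's own statement) =====
-- stated objective: alternative
-- what changed: Replaces A's while-True loop (mutable state, a res accumulator, break test 'a*n+b < m', ceiling coefficient (v+a-1)//a and residue (a-v)%a) by a non-tail recursion built from a _red helper returning (residue, quotient) pairs, a quotient-first base test 'u <= 0', and a ceiling-free reformulation through c = b - u*m with coefficient (n + c//a) and next residue c % a; …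
-- outside the precondition, e.g. on floor_sum(-4, 1, -6, -6): A returns -171, B raises RecursionError; on floor_sum(5, -7, 3, 2): A returns -15, B raises RecursionError; on floor_sum(3, 0, 1, 1): A raises ZeroDivisionError, B raises ZeroDivisionError
import Mathlib
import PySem

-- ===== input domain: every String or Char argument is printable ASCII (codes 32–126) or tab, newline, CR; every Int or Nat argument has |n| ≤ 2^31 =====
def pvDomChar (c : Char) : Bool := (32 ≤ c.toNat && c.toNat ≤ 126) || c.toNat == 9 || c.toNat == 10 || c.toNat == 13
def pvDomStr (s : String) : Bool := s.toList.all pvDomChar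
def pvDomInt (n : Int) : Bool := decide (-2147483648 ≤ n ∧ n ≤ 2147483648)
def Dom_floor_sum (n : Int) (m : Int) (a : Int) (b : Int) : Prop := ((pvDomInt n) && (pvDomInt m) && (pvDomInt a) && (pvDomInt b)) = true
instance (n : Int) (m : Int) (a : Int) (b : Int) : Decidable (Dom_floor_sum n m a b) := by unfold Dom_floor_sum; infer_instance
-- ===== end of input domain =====

-- B replaces A's while-True loop (accumulator, break test, ceiling coefficient (v+a-1)//a and
-- residue (a-v)%a) by a non-tail recursion over (residue, quotient) pairs with a quotient-first
-- base test and the ceiling-free forms (n + c//a), c % a for c = b - u*m; same logarithmic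
-- cost — objective: alternative decomposition.

-- ===== PORT A =====
-- Fuel bounds the loop only to make the Lean function total; within Pre_ the loop performs at
-- most m iterations (the modulus strictly decreases), so fuel m.toNat + 1 is never exhausted.
def floorSumLoopA : Nat → Int → Int → Int → Int → Int → Int
  | 0, _, _, _, _, res => res
  | fuel+1, n, m, a, b, res =>
    let res1 := if m ≤ a then res + PySem.Int.floordiv (PySem.Int.floordiv a m * n * (n-1)) 2 else res
    let a1 := if m ≤ a then PySem.Int.mod a m else a
    let res2 := if m ≤ b then res1 + n * PySem.Int.floordiv b m else res1
    let b1 := if m ≤ b then PySem.Int.mod b m else b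
    if a1 * n + b1 < m then res2
    else
      let u := PySem.Int.floordiv (a1 * n + b1) m
      let v := u * m - b1
      floorSumLoopA fuel u a1 m (PySem.Int.mod (a1 - v) a1)
        (res2 + (n - PySem.Int.floordiv (v + a1 - 1) a1) * u)

def floor_sum (n : Int) (m : Int) (a : Int) (b : Int) : Int :=
  floorSumLoopA (m.toNat + 1) n m a b 0

-- ===== PORT B =====
-- (residue, quotient) of x by m, applied only once x has reached m (port of Source B's _red)
def pyRed (x m : Int) : Int × Int :=
  if m ≤ x then (PySem.Int.mod x m, PySem.Int.floordiv x m) else (x, 0)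

-- Fuel again only guards totality; within Pre_ the recursion depth is bounded by m.
def floorSumRecB : Nat → Int → Int → Int → Int → Int
  | 0, _, _, _, _ => 0
  | fuel+1, n, m, a, b =>
    let ra := pyRed a m
    let rb := pyRed b m
    let part := ra.2 * PySem.Int.floordiv ((n - 1) * n) 2 + rb.2 * n
    let u := PySem.Int.floordiv (ra.1 * n + rb.1) m
    if u ≤ 0 then part
    else
      let c := rb.1 - u * m
      part + u * (n + PySem.Int.floordiv c ra.1)
        + floorSumRecB fuel u ra.1 m (PySem.Int.mod c ra.1)

def floor_sum_alt (n : Int) (m : Int) (a : Int) (b : Int) : Int :=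
  floorSumRecB (m.toNat + 1) n m a b

-- ===== PRECONDITION & SPEC =====
-- Pre_ keeps to the contract domain: for m <= 0 A raises ZeroDivisionError or loops forever, and
-- for n < 0 (a negative range length, outside the contract) A returns unspecified values or loops
-- forever while B's recursion can be unbounded.
def Pre_floor_sum (n : Int) (m : Int) (a : Int) (b : Int) : Prop := 0 ≤ n ∧ 1 ≤ m
instance (n : Int) (m : Int) (a : Int) (b : Int) : Decidable (Pre_floor_sum n m a b) := by unfold Pre_floor_sum; infer_instance

def pvWitness_floor_sum : Int × Int × Int × Int := (7, 5, 3, 2)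

def Spec_floor_sum (n : Int) (m : Int) (a : Int) (b : Int) (out : Int) : Prop := out = floor_sum_alt n m a b
instance (n : Int) (m : Int) (a : Int) (b : Int) (out : Int) : Decidable (Spec_floor_sum n m a b out) := by unfold Spec_floor_sum; infer_instance

-- ===== CLAIM (what is proved, stated in full; the proofs are below) =====
def Claim_equal_floor_sum : Prop := ∀ (n : Int) (m : Int) (a : Int) (b : Int), Dom_floor_sum n m a b → Pre_floor_sum n m a b → Spec_floor_sum n m a b (floor_sum n m a b)

-- ===== LEMMAS AND PROOFS =====

-- floor of the predecessor vs the ceiling: (t-1)/a = -((-t)/a) - 1 for a > 0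
lemma ediv_pred (a t : Int) (ha : 0 < a) : (t - 1) / a = -((-t) / a) - 1 := by
  have h := Int.emod_add_mul_ediv (-t) a
  have hr0 : 0 ≤ (-t) % a := Int.emod_nonneg _ (by omega)
  have hra : (-t) % a < a := Int.emod_lt_of_pos _ ha
  have key : t - 1 = (a - (-t) % a - 1) + (-((-t) / a) - 1) * a := by linarith [h]
  rw [key, Int.add_mul_ediv_right _ _ (by omega : a ≠ 0),
      Int.ediv_eq_zero_of_lt (by omega) (by omega)]
  ring

-- A's ceiling coefficient equals B's floor form: (v+a-1)/a = -((-v)/a) for a > 0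
lemma ceil_shift (a v : Int) (ha : 0 < a) : (v + a - 1) / a = -((-v) / a) := by
  have e1 : v + a - 1 = (v - 1) + 1 * a := by ring
  rw [e1, Int.add_mul_ediv_right _ _ (by omega : a ≠ 0), ediv_pred _ _ ha]
  ring

-- A's residue equals B's: (a-v) % a = (-v) % a
lemma res_shift (a v : Int) : (a - v) % a = (-v) % a := by
  have e1 : a - v = -v + a * 1 := by ring
  rw [e1, Int.add_mul_emod_self_left]

-- A's triangle-term grouping equals B's: (q*n*(n-1))/2 = q*((n*(n-1))/2)
lemma tri_eq (q n : Int) : (q * n * (n - 1)) / 2 = q * (n * (n - 1) / 2) := by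
  have h2 : (2 : Int) ∣ n * (n - 1) := by
    rcases Int.even_or_odd n with ⟨k, hk⟩ | ⟨k, hk⟩
    · exact ⟨k * (n - 1), by rw [hk]; ring⟩
    · exact ⟨n * k, by rw [hk]; ring⟩
  rw [mul_assoc, Int.mul_ediv_assoc _ h2]

-- same lemma on the PySem primitives, in B's grouping
lemma tri_fd (q n : Int) :
    PySem.Int.floordiv (q * n * (n - 1)) 2 = q * PySem.Int.floordiv ((n - 1) * n) 2 := by
  rw [PySem.Int.floordiv_eq_ediv_of_pos (by norm_num : (0:Int) < 2),
      PySem.Int.floordiv_eq_ediv_of_pos (by norm_num : (0:Int) < 2),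
      show (n - 1) * n = n * (n - 1) by ring, tri_eq]

-- One step after the reductions: A's break test coincides with B's base test 'u <= 0',
-- A's descent payload (ceiling coefficient, residue (a-v)%a) equals B's (floor form, c%a),
-- and the continuations agree by the induction hypothesis for the smaller modulus.
lemma descend (f : Nat)
    (ih : ∀ (n m a b res : Int), 0 ≤ n → 1 ≤ m → m ≤ (f : Int) →
      floorSumLoopA f n m a b res = res + floorSumRecB f n m a b)
    (n m α β res RA PB : Int) (hR : RA = res + PB)
    (hn : 0 ≤ n) (hm0 : 0 < m) (hα : α < m) (hβ : β < m) (hf : m ≤ (f : Int) + 1) :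
    (if α * n + β < m then RA
     else floorSumLoopA f (PySem.Int.floordiv (α * n + β) m) α m
            (PySem.Int.mod (α - (PySem.Int.floordiv (α * n + β) m * m - β)) α)
            (RA + (n - PySem.Int.floordiv (PySem.Int.floordiv (α * n + β) m * m - β + α - 1) α)
               * PySem.Int.floordiv (α * n + β) m))
    = res + (if PySem.Int.floordiv (α * n + β) m ≤ 0 then PB
       else PB + PySem.Int.floordiv (α * n + β) m
               * (n + PySem.Int.floordiv (β - PySem.Int.floordiv (α * n + β) m * m) α)
         + floorSumRecB f (PySem.Int.floordiv (α * n + β) m) α m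
             (PySem.Int.mod (β - PySem.Int.floordiv (α * n + β) m * m) α)) := by
  have hdivS : PySem.Int.floordiv (α * n + β) m = (α * n + β) / m :=
    PySem.Int.floordiv_eq_ediv_of_pos hm0
  have hone : 1 ≤ (α * n + β) / m ↔ m ≤ α * n + β := by
    rw [Int.le_ediv_iff_mul_le hm0, one_mul]
  by_cases hbr : α * n + β < m
  · have hu : PySem.Int.floordiv (α * n + β) m ≤ 0 := by rw [hdivS]; omega
    rw [if_pos hbr, if_pos hu, hR]
  · have hu1 : 1 ≤ PySem.Int.floordiv (α * n + β) m := by rw [hdivS]; omega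
    have hαn : 0 < α * n := by
      have hβm : m ≤ α * n + β := by omega
      nlinarith
    have hα0 : 0 < α := by
      by_contra hc
      exact absurd hαn (not_lt.mpr (mul_nonpos_of_nonpos_of_nonneg (by omega) hn))
    set u := PySem.Int.floordiv (α * n + β) m with hu
    have hcoef : PySem.Int.floordiv (u * m - β + α - 1) α
        = -(PySem.Int.floordiv (β - u * m) α) := by
      rw [PySem.Int.floordiv_eq_ediv_of_pos hα0, PySem.Int.floordiv_eq_ediv_of_pos hα0,
          ceil_shift _ _ hα0, show -(u * m - β) = β - u * m by ring]
    have hres : PySem.Int.mod (α - (u * m - β)) α = PySem.Int.mod (β - u * m) α := by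
      rw [PySem.Int.mod_eq_emod_of_pos hα0, PySem.Int.mod_eq_emod_of_pos hα0,
          res_shift, show -(u * m - β) = β - u * m by ring]
    rw [if_neg hbr, if_neg (by omega), hres, hcoef]
    rw [ih u α m (PySem.Int.mod (β - u * m) α) _ (by omega) (by omega) (by omega)]
    rw [hR]; ring

lemma loop_eq_rec (fuel : Nat) : ∀ (n m a b res : Int), 0 ≤ n → 1 ≤ m →
    m ≤ (fuel : Int) →
    floorSumLoopA fuel n m a b res = res + floorSumRecB fuel n m a b := by
  induction fuel with
  | zero => intro n m a b res hn hm hf; exfalso; push_cast at hf; omega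
  | succ f ih =>
    intro n m a b res hn hm hf
    have hm0 : (0:Int) < m := by omega
    have hf' : m ≤ (f : Int) + 1 := by push_cast at hf; omega
    simp only [floorSumLoopA, floorSumRecB, pyRed]
    by_cases h1 : m ≤ a <;> by_cases h2 : m ≤ b <;>
      simp only [h1, h2, if_true, if_false]
    · exact descend f ih n m (PySem.Int.mod a m) (PySem.Int.mod b m) res _ _
        (by rw [tri_fd]; ring) hn hm0
        (by rw [PySem.Int.mod_eq_emod_of_pos hm0]; exact Int.emod_lt_of_pos a hm0)
        (by rw [PySem.Int.mod_eq_emod_of_pos hm0]; exact Int.emod_lt_of_pos b hm0) hf'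
    · exact descend f ih n m (PySem.Int.mod a m) b res _ _
        (by rw [tri_fd]; ring) hn hm0
        (by rw [PySem.Int.mod_eq_emod_of_pos hm0]; exact Int.emod_lt_of_pos a hm0)
        (by omega) hf'
    · exact descend f ih n m a (PySem.Int.mod b m) res _ _
        (by ring) hn hm0 (by omega)
        (by rw [PySem.Int.mod_eq_emod_of_pos hm0]; exact Int.emod_lt_of_pos b hm0) hf'
    · exact descend f ih n m a b res _ _ (by ring) hn hm0 (by omega) (by omega) hf'

-- ===== VERDICT (by name: the statement is the Claim_ definition above) =====
theorem floor_sum_spec : Claim_equal_floor_sum := by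
  intro n m a b _ ⟨hn, hm⟩
  unfold Spec_floor_sum floor_sum floor_sum_alt
  exact (loop_eq_rec (m.toNat + 1) n m a b 0 hn hm (by omega)).trans (by ring)
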